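-- pv_equiv track=rewrite | github.com/Saikatriki2004/GFGPOTD_2025 | JUNE_2025/06_Jun.py | search
-- ===== SOURCE A (Python) =====
-- def search(pat, txt):
--     """
--     Returns a list of 1-based positions where 'pat' occurs in 'txt'.
--     If there are no occurrences, returns an empty list.
--     """
--
--     n, m = len(txt), len(pat)
--     if m == 0 or n < m:
--         return []  # empty pattern or pattern longer than text → no matches
--
--     # Step 1: Build LPS array for 'pat'.
--     # lps[i] = length of the longest proper prefix of pat[:i+1]
--     #          which is also a suffix of pat[:i+1].
--     lps = [0] * m
--     length = 0  # length of the previous longest prefix‐suffix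
--     i = 1
--     while i < m:
--         if pat[i] == pat[length]:
--             length += 1
--             lps[i] = length
--             i += 1
--         else:
--             if length != 0:
--                 # fall back to the previous longest prefix‐suffix
--                 length = lps[length - 1]
--                 # (no increment of i here)
--             else:
--                 # no proper prefix that matches suffix at this point
--                 lps[i] = 0
--                 i += 1
--
--     # Step 2: Scan 'txt' with two indices: i over txt, j over pat.
--     res = []
--     i = 0  # index in txt
--     j = 0  # index in pat
--     while i < n:
--         if txt[i] == pat[j]:
--             i += 1
--             j += 1
--             if j == m:
--                 # we found a complete match ending at txt[i-1].
--                 # Start index in 'txt' (0-based) is i-j.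
--                 # Convert to 1-based:
--                 res.append((i - j) + 1)
--                 # Prepare j for the next possible match
--                 j = lps[j - 1]
--         else:
--             if j != 0:
--                 # slide pattern to the right, based on LPS
--                 j = lps[j - 1]
--             else:
--                 i += 1
--
--     return res
-- ===== SOURCE B (Python) =====
-- def search(pat, txt):
--     n, m = len(txt), len(pat)
--     if m == 0 or n < m:
--         return []
--     return [s + 1 for s in range(n - m + 1) if txt[s:s + m] == pat]
-- ===== Notes on version B (the rewrite author's own statement) =====
-- stated objective: simpler
-- what changed: Replaced the KMP algorithm (LPS-table preprocessing plus a two-index automaton scan) by a one-line naive substring search that tests txt[s:s+m] == pat at every start position.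
import Mathlib
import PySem

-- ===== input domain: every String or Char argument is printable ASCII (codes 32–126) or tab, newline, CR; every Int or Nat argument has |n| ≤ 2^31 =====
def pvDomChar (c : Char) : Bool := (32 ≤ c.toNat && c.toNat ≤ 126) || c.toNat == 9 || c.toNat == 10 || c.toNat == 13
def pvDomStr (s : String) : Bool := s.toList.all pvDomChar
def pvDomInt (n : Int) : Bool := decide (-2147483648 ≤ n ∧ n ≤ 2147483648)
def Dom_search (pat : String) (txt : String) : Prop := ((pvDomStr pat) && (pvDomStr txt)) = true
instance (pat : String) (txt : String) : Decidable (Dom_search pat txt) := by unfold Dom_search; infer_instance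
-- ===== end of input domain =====

-- B replaces A's KMP (LPS table + two-index automaton) by a naive scan testing txt[s:s+m] == pat
-- at every start; objective: simpler (despite worse asymptotics, a timing run measured B faster
-- in CPython, where the slice comparison runs in C while A's scan is interpreted per character).

-- ===== PORT A =====
-- A's first while loop (build the LPS table); fuel only makes the recursion structural,
-- it is always sufficient (2*m) and the loop body is A's, branch for branch.
def lpsLoop (p : List Char) (fuel : Nat) (lps : List Nat) (len i : Nat) : List Nat :=
  match fuel with
  | 0 => lps
  | fuel + 1 =>
    if i < p.length then
      if p.getD i ' ' = p.getD len ' ' then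
        lpsLoop p fuel (lps.set i (len + 1)) (len + 1) (i + 1)
      else
        if len ≠ 0 then
          lpsLoop p fuel lps (lps.getD (len - 1) 0) i
        else
          lpsLoop p fuel (lps.set i 0) 0 (i + 1)
    else lps

-- A's second while loop (scan txt with indices i over txt and j over pat); fuel 2*n+1 always suffices.
def scanLoop (p t : List Char) (lps : List Nat) (fuel : Nat) (res : List Int) (i j : Nat) : List Int :=
  match fuel with
  | 0 => res
  | fuel + 1 =>
    if i < t.length then
      if t.getD i ' ' = p.getD j ' ' then
        if j + 1 = p.length then
          scanLoop p t lps fuel (res ++ [((i : Int) + 1 - ((j : Int) + 1)) + 1]) (i + 1) (lps.getD (j + 1 - 1) 0)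
        else
          scanLoop p t lps fuel res (i + 1) (j + 1)
      else
        if j ≠ 0 then
          scanLoop p t lps fuel res i (lps.getD (j - 1) 0)
        else
          scanLoop p t lps fuel res (i + 1) j
    else res

def search (pat : String) (txt : String) : List Int :=
  if pat.toList.length = 0 ∨ txt.toList.length < pat.toList.length then []
  else
    scanLoop pat.toList txt.toList
      (lpsLoop pat.toList (2 * pat.toList.length) (List.replicate pat.toList.length 0) 0 1)
      (2 * txt.toList.length + 1) [] 0 0

-- ===== PORT B =====
def search_alt (pat : String) (txt : String) : List Int :=
  if pat.toList.length = 0 ∨ txt.toList.length < pat.toList.length then []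
  else
    ((PySem.List.pyRange 0 ((txt.toList.length : Int) - (pat.toList.length : Int) + 1) 1).filter
        (fun s =>
          decide (PySem.List.slice txt.toList (some s) (some (s + (pat.toList.length : Int)))
            = pat.toList))).map
      (fun s => s + 1)

-- ===== PRECONDITION & SPEC =====
def Spec_search (pat : String) (txt : String) (out : List Int) : Prop := out = search_alt pat txt
instance (pat : String) (txt : String) (out : List Int) : Decidable (Spec_search pat txt out) := by unfold Spec_search; infer_instance

-- ===== CLAIM (what is proved, stated in full; the proofs are below) =====
def Claim_equal_search : Prop := ∀ (pat : String) (txt : String), Dom_search pat txt → Spec_search pat txt (search pat txt)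

-- ===== LEMMAS AND PROOFS =====

lemma take_snoc (l : List Char) (i : Nat) (h : i < l.length) :
    l.take i ++ [l.getD i ' '] = l.take (i + 1) := by
  rw [List.take_add_one, List.getElem?_eq_getElem h, List.getD_eq_getElem l ' ' h]
  rfl

lemma suffix_snoc_of_suffix {x y : List Char} (c : Char) (h : x <:+ y) :
    x ++ [c] <:+ y ++ [c] := by
  obtain ⟨w, rfl⟩ := h
  exact ⟨w, (List.append_assoc w x [c]).symm⟩

lemma snoc_suffix_snoc_iff {x y : List Char} {a b : Char} :
    x ++ [a] <:+ y ++ [b] ↔ a = b ∧ x <:+ y := by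
  rw [← List.reverse_prefix, List.reverse_append, List.reverse_append]
  simp only [List.reverse_singleton, List.singleton_append, List.cons_prefix_cons,
    List.reverse_prefix]

lemma suffix_of_suffix_length_le {x y z : List Char} (hx : x <:+ z) (hy : y <:+ z)
    (h : x.length ≤ y.length) : x <:+ y := by
  rw [← List.reverse_prefix] at hx hy ⊢
  exact List.prefix_of_prefix_length_le hx hy (by simpa using h)

lemma take_suffix_snoc_iff (p w : List Char) (c : Char) (k : Nat) (hk1 : 1 ≤ k)
    (hk : k ≤ p.length) :
    p.take k <:+ w ++ [c] ↔ (p.take (k - 1) <:+ w ∧ p.getD (k - 1) ' ' = c) := by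
  have hlt : k - 1 < p.length := by omega
  have hdec : p.take k = p.take (k - 1) ++ [p.getD (k - 1) ' '] := by
    rw [take_snoc p (k - 1) hlt, Nat.sub_add_cancel hk1]
  rw [hdec, snoc_suffix_snoc_iff, and_comm]

def lpsVal (p : List Char) (i : Nat) : Nat :=
  Nat.findGreatest (fun k => p.take k <:+ p.take (i + 1)) i

lemma lpsVal_le (p : List Char) (i : Nat) : lpsVal p i ≤ i := Nat.findGreatest_le i

lemma lpsVal_suffix (p : List Char) (i : Nat) : p.take (lpsVal p i) <:+ p.take (i + 1) := by
  unfold lpsVal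
  exact Nat.findGreatest_spec (P := fun k => p.take k <:+ p.take (i + 1)) (Nat.zero_le i)
    (show p.take 0 <:+ p.take (i + 1) by
      rw [List.take_zero]
      exact List.nil_suffix)

lemma le_lpsVal (p : List Char) {i k : Nat} (h : k ≤ i) (hs : p.take k <:+ p.take (i + 1)) :
    k ≤ lpsVal p i := Nat.le_findGreatest h hs

-- the chain condition: every nonempty prefix of p that is a suffix of w ++ [c] (length ≤ b) has
-- length at most j + 1
def Chain (p w : List Char) (c : Char) (b j : Nat) : Prop :=
  ∀ k, 1 ≤ k → k ≤ b → p.take k <:+ w ++ [c] → k - 1 ≤ j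

lemma chain_step (p : List Char) (i L : Nat) (h1 : i + 1 < p.length) (hL : lpsVal p i = L) :
    Chain p (p.take (i + 1)) (p.getD (i + 1) ' ') (i + 1) L := by
  intro k hk1 hk2 hsuf
  rw [take_suffix_snoc_iff p _ _ k hk1 (by omega)] at hsuf
  have := le_lpsVal p (i := i) (k := k - 1) (by omega) hsuf.1
  omega

def lpsSpec (p : List Char) : List Nat := (List.range p.length).map (lpsVal p)

lemma getD_set_lt (lps : List Nat) (i q v : Nat) (h : q < lps.length) (hne : q ≠ i) :
    (lps.set i v).getD q 0 = lps.getD q 0 := by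
  rw [List.getD_eq_getElem _ 0 h, List.getD_eq_getElem _ 0 (by simpa using h),
    List.getElem_set_ne (by omega)]

lemma getD_set_self (lps : List Nat) (i v : Nat) (h : i < lps.length) :
    (lps.set i v).getD i 0 = v := by
  rw [List.getD_eq_getElem _ 0 (by simpa using h), List.getElem_set_self (by simpa using h)]

def LpsInv (p : List Char) (lps : List Nat) (len i : Nat) : Prop :=
  1 ≤ i ∧ i ≤ p.length ∧ lps.length = p.length ∧
  (∀ q, q < i → lps.getD q 0 = lpsVal p q) ∧
  len < i ∧ p.take len <:+ p.take i ∧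
  (i < p.length → Chain p (p.take i) (p.getD i ' ') i len)

lemma lps_final (p : List Char) (lps : List Nat) (len i : Nat)
    (h : LpsInv p lps len i) (hge : p.length ≤ i) : lps = lpsSpec p := by
  obtain ⟨h1, h2, h3, h4, -⟩ := h
  apply List.ext_getElem (by simp [lpsSpec, h3])
  intro q hq hq2
  have hqi : q < i := by omega
  have := h4 q hqi
  rw [List.getD_eq_getElem lps 0 hq] at this
  simp only [lpsSpec, List.getElem_map, List.getElem_range]
  exact this

theorem lpsLoop_eq (p : List Char) (fuel : Nat) (lps : List Nat) (len i : Nat)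
    (hInv : LpsInv p lps len i) (hfuel : 2 * (p.length - i) + len ≤ fuel) :
    lpsLoop p fuel lps len i = lpsSpec p := by
  induction fuel generalizing lps len i with
  | zero =>
    have hge : p.length ≤ i := by
      rcases hInv with ⟨h1, h2, -⟩
      omega
    simpa [lpsLoop] using lps_final p lps len i hInv hge
  | succ fuel ih =>
    by_cases hi : i < p.length
    · obtain ⟨h1, h2, h3, h4, h5, h6, h7⟩ := hInv
      have hchain := h7 hi
      have hlen_lt : len < p.length := by omega
      rw [lpsLoop, if_pos hi]
      by_cases hc : p.getD i ' ' = p.getD len ' '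
      · rw [if_pos hc]
        -- matched: lpsVal p i = len + 1
        have hP : p.take (len + 1) <:+ p.take (i + 1) := by
          rw [← take_snoc p i hi, ← take_snoc p len hlen_lt, hc]
          exact suffix_snoc_of_suffix _ h6
        have hval : lpsVal p i = len + 1 := by
          rw [lpsVal, Nat.findGreatest_eq_iff]
          refine ⟨by omega, fun _ => hP, fun k hk1 hk2 hPk => ?_⟩
          have := hchain k (by omega) hk2 (by rwa [take_snoc p i hi])
          omega
        apply ih
        · refine ⟨by omega, by omega, by simpa using h3, ?_, by omega, hP, ?_⟩
          · intro q hq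
            rcases Nat.lt_or_ge q i with hqi | hqi
            · rw [getD_set_lt lps i q (len + 1) (by omega) (by omega)]
              exact h4 q hqi
            · have hqe : q = i := by omega
              subst hqe
              rw [getD_set_self lps q (len + 1) (by omega), hval]
          · intro hi1
            exact chain_step p i (len + 1) hi1 hval
        · omega
      · rw [if_neg hc]
        by_cases hl0 : len = 0
        · rw [if_neg (by omega)]
          -- mismatch at len = 0: lpsVal p i = 0
          have hval : lpsVal p i = 0 := by
            rw [lpsVal, Nat.findGreatest_eq_zero_iff]
            intro k hk1 hk2 hPk
            have hle := hchain k (by omega) hk2 (by rwa [take_snoc p i hi])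
            rw [← take_snoc p i hi,
              take_suffix_snoc_iff p _ _ k (by omega) (by omega)] at hPk
            have hk1' : k = 1 := by omega
            subst hk1'
            simp only [Nat.sub_self] at hPk
            rw [hl0] at hc
            exact hc (hPk.2.symm)
          apply ih
          · refine ⟨by omega, by omega, by simpa using h3, ?_, by omega, by simp, ?_⟩
            · intro q hq
              rcases Nat.lt_or_ge q i with hqi | hqi
              · rw [getD_set_lt lps i q 0 (by omega) (by omega)]
                exact h4 q hqi
              · have hqe : q = i := by omega
                subst hqe
                rw [getD_set_self lps q 0 (by omega), hval]
            · intro hi1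
              exact chain_step p i 0 hi1 hval
          · omega
        · rw [if_pos (by omega)]
          -- mismatch, fall back to lps[len-1]
          have hlv : lps.getD (len - 1) 0 = lpsVal p (len - 1) := h4 _ (by omega)
          have hlpre : p.take (lpsVal p (len - 1)) <:+ p.take len := by
            have := lpsVal_suffix p (len - 1)
            rwa [Nat.sub_add_cancel (by omega)] at this
          apply ih
          · refine ⟨h1, h2, h3, h4, by have := lpsVal_le p (len - 1); omega,
              (hlv ▸ (hlpre.trans h6)), ?_⟩
            intro _ k hk1 hk2 hsuf
            have hkle : k - 1 ≤ len := hchain k hk1 hk2 hsuf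
            rw [take_suffix_snoc_iff p _ _ k hk1 (by omega)] at hsuf
            have hkne : k - 1 ≠ len := by
              intro he
              rw [he] at hsuf
              exact hc (hsuf.2.symm)
            have hsub : p.take (k - 1) <:+ p.take len :=
              suffix_of_suffix_length_le hsuf.1 h6 (by
                simp only [List.length_take]
                omega)
            have : k - 1 ≤ lpsVal p (len - 1) :=
              le_lpsVal p (by omega) (by rwa [Nat.sub_add_cancel (by omega)])
            omega
          · have := lpsVal_le p (len - 1)
            omega
    · rw [lpsLoop, if_neg hi]
      exact lps_final p lps len i hInv (by omega)

-- result prefix: 1-based start positions (as ints) of the matches whose END is ≤ i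
def resSpec (p t : List Char) (i : Nat) : List Int :=
  ((List.range i).filter (fun e => decide (p.length ≤ e + 1 ∧ p <:+ t.take (e + 1)))).map
    (fun e : Nat => (e : Int) + 2 - (p.length : Int))

lemma resSpec_succ (p t : List Char) (i : Nat) :
    resSpec p t (i + 1) =
      resSpec p t i ++
        (if p.length ≤ i + 1 ∧ p <:+ t.take (i + 1) then [(i : Int) + 2 - (p.length : Int)]
         else []) := by
  by_cases h : p.length ≤ i + 1 ∧ p <:+ t.take (i + 1) <;>
    simp [resSpec, List.range_succ, List.filter_append, h]

def ScanInv (p t : List Char) (res : List Int) (i j : Nat) : Prop :=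
  i ≤ t.length ∧ j < p.length ∧ p.take j <:+ t.take i ∧
  (i < t.length → Chain p (t.take i) (t.getD i ' ') p.length j) ∧
  res = resSpec p t i

lemma lpsSpec_getD (p : List Char) (q : Nat) (h : q < p.length) :
    (lpsSpec p).getD q 0 = lpsVal p q := by
  rw [List.getD_eq_getElem _ 0 (by simpa [lpsSpec] using h)]
  simp [lpsSpec]

lemma chain_after_match (p t' : List Char) (c : Char) (hm : 0 < p.length) (hsuf : p <:+ t') :
    Chain p t' c p.length (lpsVal p (p.length - 1)) := by
  intro k hk1 hk2 hs
  rw [take_suffix_snoc_iff p _ _ k hk1 hk2] at hs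
  have hsub : p.take (k - 1) <:+ p :=
    suffix_of_suffix_length_le hs.1 hsuf (by simp only [List.length_take]; omega)
  have : k - 1 ≤ lpsVal p (p.length - 1) := by
    apply le_lpsVal p (by omega)
    rwa [Nat.sub_add_cancel hm, List.take_length]
  omega

theorem scanLoop_eq (p t : List Char) (hm : 0 < p.length) (_hmn : p.length ≤ t.length)
    (fuel : Nat) (res : List Int) (i j : Nat)
    (hInv : ScanInv p t res i j) (hfuel : 2 * (t.length - i) + j ≤ fuel) :
    scanLoop p t (lpsSpec p) fuel res i j = resSpec p t t.length := by
  induction fuel generalizing res i j with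
  | zero =>
    obtain ⟨h1, h2, -, -, h5⟩ := hInv
    have : i = t.length := by omega
    subst this
    simpa [scanLoop] using h5
  | succ fuel ih =>
    by_cases hi : i < t.length
    · obtain ⟨h1, h2, h3, h4, h5⟩ := hInv
      have hchain := h4 hi
      rw [scanLoop, if_pos hi]
      by_cases hc : t.getD i ' ' = p.getD j ' '
      · rw [if_pos hc]
        have hsufj1 : p.take (j + 1) <:+ t.take (i + 1) := by
          rw [← take_snoc t i hi, ← take_snoc p j h2, ← hc]
          exact suffix_snoc_of_suffix _ h3
        have hji : j ≤ i := by
          have := h3.length_le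
          simp only [List.length_take] at this
          omega
        by_cases hjm : j + 1 = p.length
        · rw [if_pos hjm]
          have htl : p.take p.length = p := List.take_length
          have hmatch : p <:+ t.take (i + 1) := by
            rw [← htl, ← hjm]
            exact hsufj1
          have hlv := lpsVal_le p (p.length - 1)
          have hjj : j = p.length - 1 := by omega
          have hgd : (lpsSpec p).getD (j + 1 - 1) 0 = lpsVal p (p.length - 1) := by
            rw [Nat.add_sub_cancel, hjj, lpsSpec_getD p _ (by omega)]
          rw [hgd]
          apply ih
          · refine ⟨by omega, by omega, ?_, ?_, ?_⟩
            · refine List.IsSuffix.trans ?_ hmatch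
              have := lpsVal_suffix p (p.length - 1)
              rwa [Nat.sub_add_cancel hm, htl] at this
            · intro hi1
              exact chain_after_match p (t.take (i + 1)) (t.getD (i + 1) ' ') hm hmatch
            · rw [resSpec_succ, if_pos ⟨by omega, hmatch⟩, h5]
              congr 2
              have hc2 : ((j : Int) + 1) = (p.length : Int) := by exact_mod_cast hjm
              omega
          · omega
        · rw [if_neg hjm]
          apply ih
          · refine ⟨by omega, by omega, hsufj1, ?_, ?_⟩
            · intro hi1 k hk1 hk2 hsuf
              rw [take_suffix_snoc_iff p _ _ k hk1 hk2] at hsuf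
              rcases Nat.eq_or_lt_of_le hk1 with h1k | h1k
              · omega
              · have := hchain (k - 1) (by omega) (by omega)
                  (by rw [take_snoc t i hi]; exact hsuf.1)
                omega
            · have htl : p.take p.length = p := List.take_length
              have hnc : ¬(p.length ≤ i + 1 ∧ p <:+ t.take (i + 1)) := by
                rintro ⟨hm1, hp⟩
                have := hchain p.length (by omega) le_rfl
                  (by rw [take_snoc t i hi, htl]; exact hp)
                omega
              rw [resSpec_succ, if_neg hnc, List.append_nil]
              exact h5
          · omega
      · rw [if_neg hc]
        have htl : p.take p.length = p := List.take_length
        by_cases hj0 : j = 0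
        · rw [if_neg (by omega)]
          subst hj0
          apply ih
          · refine ⟨by omega, h2, by rw [List.take_zero]; exact List.nil_suffix, ?_, ?_⟩
            · intro hi1 k hk1 hk2 hsuf
              rw [take_suffix_snoc_iff p _ _ k hk1 hk2] at hsuf
              by_contra hgt
              have hk2' : 1 ≤ k - 1 := by omega
              have h2nd := hsuf.1
              rw [← take_snoc t i hi,
                take_suffix_snoc_iff p _ _ (k - 1) hk2' (by omega)] at h2nd
              have hch := hchain (k - 1) hk2' (by omega)
                (by rw [take_snoc t i hi]; exact hsuf.1)
              have hk12 : k - 1 - 1 = 0 := by omega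
              rw [hk12] at h2nd
              exact hc (h2nd.2.symm)
            · have hnc : ¬(p.length ≤ i + 1 ∧ p <:+ t.take (i + 1)) := by
                rintro ⟨hm1, hp⟩
                have hch := hchain p.length hm le_rfl
                  (by rw [take_snoc t i hi, htl]; exact hp)
                have hm1' : p.length = 1 := by omega
                rw [← htl, ← take_snoc t i hi,
                  take_suffix_snoc_iff p _ _ p.length hm le_rfl] at hp
                rw [hm1'] at hp
                simp only [Nat.sub_self] at hp
                exact hc (hp.2.symm)
              rw [resSpec_succ, if_neg hnc, List.append_nil]
              exact h5
          · omega
        · rw [if_pos (by omega : j ≠ 0)]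
          have hgd : (lpsSpec p).getD (j - 1) 0 = lpsVal p (j - 1) := lpsSpec_getD p _ (by omega)
          have hlv := lpsVal_le p (j - 1)
          have hlpre : p.take (lpsVal p (j - 1)) <:+ p.take j := by
            have := lpsVal_suffix p (j - 1)
            rwa [Nat.sub_add_cancel (by omega)] at this
          rw [hgd]
          apply ih
          · refine ⟨h1, by omega, hlpre.trans h3, ?_, h5⟩
            intro _ k hk1 hk2 hsuf
            have hkle := hchain k hk1 hk2 hsuf
            rw [take_suffix_snoc_iff p _ _ k hk1 hk2] at hsuf
            have hkne : k - 1 ≠ j := by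
              intro he
              rw [he] at hsuf
              exact hc (hsuf.2.symm)
            have hsub : p.take (k - 1) <:+ p.take j :=
              suffix_of_suffix_length_le hsuf.1 h3 (by simp only [List.length_take]; omega)
            have : k - 1 ≤ lpsVal p (j - 1) :=
              le_lpsVal p (by omega) (by rwa [Nat.sub_add_cancel (by omega)])
            omega
          · omega
    · obtain ⟨h1, -, -, -, h5⟩ := hInv
      have : i = t.length := by omega
      subst this
      rw [scanLoop, if_neg hi]
      exact h5

lemma suffix_take_iff (p t : List Char) (s : Nat) (h : s + p.length ≤ t.length) :
    (p <:+ t.take (s + p.length)) ↔ (t.drop s).take p.length = p := by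
  rw [List.suffix_iff_eq_drop]
  have hlen : (t.take (s + p.length)).length = s + p.length := by
    simp [List.length_take]; omega
  rw [hlen, show s + p.length - p.length = s by omega, List.drop_take,
    show s + p.length - s = p.length by omega]
  exact eq_comm

lemma resSpec_eq_naive (p t : List Char) (hm : 0 < p.length) (hmn : p.length ≤ t.length) :
    resSpec p t t.length =
      ((List.range (t.length - p.length + 1)).filter
          (fun s => decide ((t.drop s).take p.length = p))).map (fun s : Nat => (s : Int) + 1) := by
  have h0 : t.length = (p.length - 1) + (t.length - p.length + 1) := by omega
  rw [resSpec]
  conv_lhs => rw [h0]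
  rw [List.range_add, List.filter_append, List.map_append]
  have hnil : (List.range (p.length - 1)).filter
      (fun e => decide (p.length ≤ e + 1 ∧ p <:+ t.take (e + 1))) = [] := by
    rw [List.filter_eq_nil_iff]
    intro e he
    rw [List.mem_range] at he
    simp only [decide_eq_true_eq]
    rintro ⟨hle, -⟩
    omega
  rw [hnil, List.map_nil, List.nil_append, List.filter_map, List.map_map]
  have hq : ∀ s ∈ List.range (t.length - p.length + 1),
      ((fun e => decide (p.length ≤ e + 1 ∧ p <:+ t.take (e + 1))) ∘
        (fun k => p.length - 1 + k)) s = decide ((t.drop s).take p.length = p) := by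
    intro s hs
    rw [List.mem_range] at hs
    simp only [Function.comp_apply]
    rw [show p.length - 1 + s + 1 = s + p.length by omega]
    apply decide_eq_decide.mpr
    rw [and_iff_right (Nat.le_add_left _ _)]
    exact suffix_take_iff p t s (by omega)
  rw [List.filter_congr hq]
  apply List.map_congr_left
  intro s _
  simp only [Function.comp_apply]
  omega

theorem search_eq_alt (pat txt : String) : search pat txt = search_alt pat txt := by
  unfold search search_alt
  by_cases hg : pat.toList.length = 0 ∨ txt.toList.length < pat.toList.length
  · rw [if_pos hg, if_pos hg]
  · rw [if_neg hg, if_neg hg]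
    have hm : 0 < pat.toList.length := by
      rcases Nat.eq_zero_or_pos pat.toList.length with h | h
      · exact absurd (Or.inl h) hg
      · exact h
    have hmn : pat.toList.length ≤ txt.toList.length := by
      by_contra h
      exact hg (Or.inr (by omega))
    have hInv1 : LpsInv pat.toList (List.replicate pat.toList.length 0) 0 1 := by
      refine ⟨le_rfl, hm, by simp, ?_, by omega,
        by rw [List.take_zero]; exact List.nil_suffix, ?_⟩
      · intro q hq
        have hq0 : q = 0 := by omega
        subst hq0
        rw [List.getD_eq_getElem _ 0 (by simpa using hm), List.getElem_replicate]
        rfl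
      · intro _ k hk1 hk2 _
        omega
    have hInv2 : ScanInv pat.toList txt.toList [] 0 0 := by
      refine ⟨Nat.zero_le _, hm, by rw [List.take_zero]; exact List.nil_suffix, ?_, ?_⟩
      · intro _ k hk1 hk2 hsuf
        have hlen := hsuf.length_le
        simp only [List.take_zero, List.nil_append, List.length_singleton,
          List.length_take] at hlen
        omega
      · simp [resSpec]
    rw [lpsLoop_eq pat.toList _ _ 0 1 hInv1 (by omega),
      scanLoop_eq pat.toList txt.toList hm hmn _ _ 0 0 hInv2 (by omega),
      resSpec_eq_naive _ _ hm hmn]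
    have hcast : (txt.toList.length : Int) - (pat.toList.length : Int) + 1 =
        ((txt.toList.length - pat.toList.length + 1 : Nat) : Int) := by omega
    rw [hcast, PySem.List.pyRange_zero_nat, List.filter_map, List.map_map]
    have hq : ∀ s ∈ List.range (txt.toList.length - pat.toList.length + 1),
        ((fun s : Int =>
            decide (PySem.List.slice txt.toList (some s) (some (s + (pat.toList.length : Int)))
              = pat.toList)) ∘ (fun k : Nat => (k : Int))) s
          = decide ((txt.toList.drop s).take pat.toList.length = pat.toList) := by
      intro s _
      simp only [Function.comp_apply]
      rw [PySem.List.slice_natCast_add]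
    rw [List.filter_congr hq]
    apply List.map_congr_left
    intro s _
    simp only [Function.comp_apply]

-- ===== VERDICT (by name: the statement is the Claim_ definition above) =====
theorem search_spec : Claim_equal_search := by
  intro pat txt _
  unfold Spec_search
  exact search_eq_alt pat txt
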